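-- pv_equiv track=rewrite | github.com/hoaiphamthi/NPG-for-composite-models | save_and_plot.py | assign_marker
-- ===== SOURCE A (Python) =====
-- def assign_marker(alg_names):
--     marker_map = {
--     'NPG': ['o', '*', 'D', 'x'],    # For 'NPG' group #fc8d59
--     'LS': ['<', '>', 'x'],             # For 'LS' group
--     'AdPG': ['^', 'v','+']                # AdPG group
-- }
--     assigned_markers = []
--
--     # Track usage index for each group
--     marker_index = {'NPG': 0, 'LS': 0, 'AdPG': 0}
--     if not any("NPG1" in name for name in alg_names): marker_map["NPG"] = marker_map["NPG"][1:]
--     for name in alg_names: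
--         if 'NPG' in name:
--             group = 'NPG'
--         elif 'LS' in name:
--             group = 'LS'
--         else:
--             group = 'AdPG'
--
--         # Pick next color in group's list (cycle if needed)
--         group_markers = marker_map[group]
--         index = marker_index[group] % len(group_markers)
--         assigned_markers.append(group_markers[index])
--         marker_index[group] += 1
--     return assigned_markers
-- ===== SOURCE B (Python) =====
-- def assign_marker(alg_names):
--     npg_markers = ['o', '*', 'D', 'x'] if any('NPG1' in n for n in alg_names) else ['*', 'D', 'x']
--     marker_map = {'NPG': npg_markers, 'LS': ['<', '>', 'x'], 'AdPG': ['^', 'v', '+']}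
--     groups = ['NPG' if 'NPG' in n else 'LS' if 'LS' in n else 'AdPG' for n in alg_names]
--     # precompute, per group, the full cycled marker sequence it will consume
--     queues = {g: [ms[j % len(ms)] for j in range(groups.count(g))] for g, ms in marker_map.items()}
--     iters = {g: iter(q) for g, q in queues.items()}
--     return [next(iters[g]) for g in groups]
-- ===== Notes on version B (the rewrite author's own statement) =====
-- stated objective: alternative
-- what changed: A's single interleaved pass with mutable per-group usage counters is replaced by a classify-then-distribute decomposition: classify each name once, precompute each group's full cycled marker sequence from its group count, then a second pass pops the next marker off the matching group's queue.
import Mathlib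
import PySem

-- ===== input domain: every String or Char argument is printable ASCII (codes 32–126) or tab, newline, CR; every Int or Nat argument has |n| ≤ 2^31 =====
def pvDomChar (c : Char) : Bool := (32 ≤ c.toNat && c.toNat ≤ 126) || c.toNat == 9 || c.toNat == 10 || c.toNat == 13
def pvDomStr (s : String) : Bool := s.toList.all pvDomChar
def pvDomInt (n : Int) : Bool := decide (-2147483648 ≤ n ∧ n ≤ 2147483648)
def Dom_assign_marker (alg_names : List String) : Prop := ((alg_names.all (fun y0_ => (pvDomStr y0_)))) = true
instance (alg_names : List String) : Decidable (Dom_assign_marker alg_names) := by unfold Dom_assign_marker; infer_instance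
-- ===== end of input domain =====

-- B replaces A's single pass with mutable per-group counters by: classify once, precompute each
-- group's cycled marker sequence, then distribute (alternative decomposition, same cost).

-- ===== PORT A =====
-- the body of A's for-loop (st = (assigned_markers, marker_index))
def pvLoopBodyA (marker_map : PySem.Dict String (List String))
    (st : List String × PySem.Dict String Int) (name : String) :
    List String × PySem.Dict String Int :=
  let group := if PySem.Str.isIn "NPG" name then "NPG"
               else if PySem.Str.isIn "LS" name then "LS" else "AdPG"
  let group_markers := marker_map.getD group []
  let index := PySem.Int.mod (st.2.getD group 0) (group_markers.length : Int)
  (st.1 ++ [PySem.List.pyGetD group_markers index ""],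
   st.2.insert group (st.2.getD group 0 + 1))

def assign_marker (alg_names : List String) : List String :=
  let marker_map : PySem.Dict String (List String) :=
    PySem.Dict.ofList [("NPG", ["o", "*", "D", "x"]), ("LS", ["<", ">", "x"]), ("AdPG", ["^", "v", "+"])]
  let marker_map :=
    if alg_names.any (fun name => PySem.Str.isIn "NPG1" name) then marker_map
    else marker_map.insert "NPG" (PySem.List.slice (marker_map.getD "NPG" []) (some 1) none)
  let marker_index : PySem.Dict String Int :=
    PySem.Dict.ofList [("NPG", 0), ("LS", 0), ("AdPG", 0)]
  (alg_names.foldl (pvLoopBodyA marker_map) ([], marker_index)).1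

-- ===== PORT B =====
def pvGroupOf (name : String) : String :=
  if PySem.Str.isIn "NPG" name then "NPG"
  else if PySem.Str.isIn "LS" name then "LS" else "AdPG"

-- [ms[j % len(ms)] for j in range(k)]
def pvCycle (ms : List String) (k : Nat) : List String :=
  (List.range k).map (fun j => ms.getD (j % ms.length) "")

-- the final list comprehension: pop the next marker off the group's queue
def pvDistribute : List String → List String → List String → List String → List String
  | [], _, _, _ => []
  | g :: gs, qN, qL, qA =>
    if g = "NPG" then qN.headD "" :: pvDistribute gs qN.tail qL qA
    else if g = "LS" then qL.headD "" :: pvDistribute gs qN qL.tail qA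
    else qA.headD "" :: pvDistribute gs qN qL qA.tail

def assign_marker_alt (alg_names : List String) : List String :=
  let npg_markers := if alg_names.any (fun n => PySem.Str.isIn "NPG1" n)
                     then ["o", "*", "D", "x"] else ["*", "D", "x"]
  let groups := alg_names.map pvGroupOf
  pvDistribute groups
    (pvCycle npg_markers (groups.count "NPG"))
    (pvCycle ["<", ">", "x"] (groups.count "LS"))
    (pvCycle ["^", "v", "+"] (groups.count "AdPG"))

-- ===== PRECONDITION & SPEC =====
def Spec_assign_marker (alg_names : List String) (out : List String) : Prop := out = assign_marker_alt alg_names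
instance (alg_names : List String) (out : List String) : Decidable (Spec_assign_marker alg_names out) := by unfold Spec_assign_marker; infer_instance

-- ===== CLAIM (what is proved, stated in full; the proofs are below) =====
def Claim_equal_assign_marker : Prop := ∀ (alg_names : List String), Dom_assign_marker alg_names → Spec_assign_marker alg_names (assign_marker alg_names)

-- ===== LEMMAS AND PROOFS =====

-- B's queue of a group, as seen mid-loop: cycled markers starting at offset `off`
def pvCycOff (ms : List String) (off k : Nat) : List String :=
  (List.range k).map (fun j => ms.getD ((off + j) % ms.length) "")

lemma pvCycle_eq_cycOff (ms : List String) (k : Nat) : pvCycle ms k = pvCycOff ms 0 k := by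
  simp [pvCycle, pvCycOff]

lemma pvCycOff_succ (ms : List String) (off k : Nat) :
    pvCycOff ms off (k + 1) = ms.getD (off % ms.length) "" :: pvCycOff ms (off + 1) k := by
  simp only [pvCycOff, List.range_succ_eq_map, List.map_cons, List.map_map, Nat.add_zero]
  refine congrArg₂ List.cons rfl (List.map_congr_left fun j _ => ?_)
  simp only [Function.comp_apply]
  congr 2
  omega

-- the state dict of A's loop, reduced on its three literal keys
lemma dict_getD_N (a b c : Int) :
    (PySem.Dict.ofList [("NPG", a), ("LS", b), ("AdPG", c)]).getD "NPG" 0 = a := rfl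
lemma dict_getD_L (a b c : Int) :
    (PySem.Dict.ofList [("NPG", a), ("LS", b), ("AdPG", c)]).getD "LS" 0 = b := rfl
lemma dict_getD_A (a b c : Int) :
    (PySem.Dict.ofList [("NPG", a), ("LS", b), ("AdPG", c)]).getD "AdPG" 0 = c := rfl
lemma dict_ins_N (a b c v : Int) :
    (PySem.Dict.ofList [("NPG", a), ("LS", b), ("AdPG", c)]).insert "NPG" v
      = PySem.Dict.ofList [("NPG", v), ("LS", b), ("AdPG", c)] := rfl
lemma dict_ins_L (a b c v : Int) :
    (PySem.Dict.ofList [("NPG", a), ("LS", b), ("AdPG", c)]).insert "LS" v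
      = PySem.Dict.ofList [("NPG", a), ("LS", v), ("AdPG", c)] := rfl
lemma dict_ins_A (a b c v : Int) :
    (PySem.Dict.ofList [("NPG", a), ("LS", b), ("AdPG", c)]).insert "AdPG" v
      = PySem.Dict.ofList [("NPG", a), ("LS", b), ("AdPG", v)] := rfl

lemma pyGetD_mod (ms : List String) (c : Nat) :
    PySem.List.pyGetD ms ((c : Int) % (ms.length : Int)) "" = ms[c % ms.length]?.getD "" := by
  rw [← Int.natCast_mod, PySem.List.pyGetD_natCast, List.getD_eq_getElem?_getD]

lemma loopA_eq (mm : PySem.Dict String (List String)) (mN mL mA : List String)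
    (hN : mm.getD "NPG" [] = mN) (hL : mm.getD "LS" [] = mL) (hA : mm.getD "AdPG" [] = mA)
    (names : List String) (acc : List String) (cN cL cA : Nat) :
    (names.foldl (pvLoopBodyA mm)
      (acc, PySem.Dict.ofList [("NPG", (cN : Int)), ("LS", (cL : Int)), ("AdPG", (cA : Int))])).1
    = acc ++ pvDistribute (names.map pvGroupOf)
        (pvCycOff mN cN ((names.map pvGroupOf).count "NPG"))
        (pvCycOff mL cL ((names.map pvGroupOf).count "LS"))
        (pvCycOff mA cA ((names.map pvGroupOf).count "AdPG")) := by
  induction names generalizing acc cN cL cA with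
  | nil => simp [pvDistribute, pvCycOff]
  | cons name rest ih =>
    simp only [List.foldl_cons, List.map_cons]
    by_cases h1 : PySem.Str.isIn "NPG" name
    · have hb : pvLoopBodyA mm (acc, PySem.Dict.ofList [("NPG", (cN : Int)), ("LS", (cL : Int)), ("AdPG", (cA : Int))]) name
          = (acc ++ [PySem.List.pyGetD mN (PySem.Int.mod (cN : Int) (mN.length : Int)) ""],
             PySem.Dict.ofList [("NPG", ((cN + 1 : Nat) : Int)), ("LS", (cL : Int)), ("AdPG", (cA : Int))]) := by
        simp only [pvLoopBodyA, h1, if_true, dict_getD_N, dict_ins_N, hN]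
        push_cast; rfl
      rw [PySem.Int.mod_natCast] at hb
      rw [hb, ih]
      have hg : pvGroupOf name = "NPG" := by unfold pvGroupOf; rw [if_pos h1]
      rw [hg]
      simp [pvDistribute, pvCycOff_succ, pyGetD_mod, List.count_cons_of_ne, List.append_assoc]
    · by_cases h2 : PySem.Str.isIn "LS" name
      · have hb : pvLoopBodyA mm (acc, PySem.Dict.ofList [("NPG", (cN : Int)), ("LS", (cL : Int)), ("AdPG", (cA : Int))]) name
            = (acc ++ [PySem.List.pyGetD mL (PySem.Int.mod (cL : Int) (mL.length : Int)) ""],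
               PySem.Dict.ofList [("NPG", (cN : Int)), ("LS", ((cL + 1 : Nat) : Int)), ("AdPG", (cA : Int))]) := by
          simp only [pvLoopBodyA, h1, h2, if_true, if_false, Bool.false_eq_true, dict_getD_L, dict_ins_L, hL]
          push_cast; rfl
        rw [PySem.Int.mod_natCast] at hb
        rw [hb, ih]
        have hg : pvGroupOf name = "LS" := by unfold pvGroupOf; rw [if_neg h1, if_pos h2]
        rw [hg]
        simp [pvDistribute, pvCycOff_succ, pyGetD_mod, List.count_cons_of_ne, List.append_assoc]
      · have hb : pvLoopBodyA mm (acc, PySem.Dict.ofList [("NPG", (cN : Int)), ("LS", (cL : Int)), ("AdPG", (cA : Int))]) name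
            = (acc ++ [PySem.List.pyGetD mA (PySem.Int.mod (cA : Int) (mA.length : Int)) ""],
               PySem.Dict.ofList [("NPG", (cN : Int)), ("LS", (cL : Int)), ("AdPG", ((cA + 1 : Nat) : Int))]) := by
          simp only [pvLoopBodyA, h1, h2, if_false, Bool.false_eq_true, dict_getD_A, dict_ins_A, hA]
          push_cast; rfl
        rw [PySem.Int.mod_natCast] at hb
        rw [hb, ih]
        have hg : pvGroupOf name = "AdPG" := by unfold pvGroupOf; rw [if_neg h1, if_neg h2]
        rw [hg]
        simp [pvDistribute, pvCycOff_succ, pyGetD_mod, List.count_cons_of_ne, List.append_assoc]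

-- ===== VERDICT (by name: the statement is the Claim_ definition above) =====
theorem assign_marker_spec : Claim_equal_assign_marker := by
  intro alg_names _
  unfold Spec_assign_marker
  simp only [assign_marker, assign_marker_alt]
  by_cases h : alg_names.any (fun name => PySem.Str.isIn "NPG1" name)
  · simp only [h, if_true]
    simpa [pvCycle_eq_cycOff] using
      loopA_eq _ ["o", "*", "D", "x"] ["<", ">", "x"] ["^", "v", "+"]
        (by decide) (by decide) (by decide) alg_names [] 0 0 0
  · simp only [h, Bool.false_eq_true, if_false]
    simpa [pvCycle_eq_cycOff] using
      loopA_eq _ ["*", "D", "x"] ["<", ">", "x"] ["^", "v", "+"]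
        (by decide) (by decide) (by decide) alg_names [] 0 0 0
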